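-- pv_equiv track=rewrite | github.com/aldairaragon/aldairaragon | listadenota.py | calificar_notas
-- ===== SOURCE A (Python) =====
-- def calificar_notas(estudiantes):
--     calificaciones = []
--     alumnos_muy_buenos = []
--     for nombre, nota in estudiantes:
--         if nota < 6:
--             calificaciones.append((nombre, "Regular"))
--         elif nota < 8:
--             calificaciones.append((nombre, "Bueno"))
--         else:
--             calificaciones.append((nombre, "Muy bueno"))
--             alumnos_muy_buenos.append(nombre)
--     return calificaciones, alumnos_muy_buenos
-- ===== SOURCE B (Python) =====
-- CATEGORIAS = ("Regular", "Bueno", "Muy bueno")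
--
-- def calificar_notas(estudiantes):
--     # band index by arithmetic on the two thresholds: 0, 1 or 2
--     niveles = [(nota >= 6) + (nota >= 8) for _, nota in estudiantes]
--     calificaciones = [(nombre, CATEGORIAS[nivel])
--                       for (nombre, _), nivel in zip(estudiantes, niveles)]
--     alumnos_muy_buenos = [nombre
--                           for (nombre, _), nivel in zip(estudiantes, niveles)
--                           if nivel == 2]
--     return calificaciones, alumnos_muy_buenos
-- ===== Notes on version B (the rewrite author's own statement) =====
-- stated objective: alternative
-- what changed: The branch-chain with two accumulators is replaced by an arithmetical band index ((nota>=6)+(nota>=8)) looked up in a category table, with both result lists derived from the zipped level list instead of maintained during a branching loop.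
import Mathlib
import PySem

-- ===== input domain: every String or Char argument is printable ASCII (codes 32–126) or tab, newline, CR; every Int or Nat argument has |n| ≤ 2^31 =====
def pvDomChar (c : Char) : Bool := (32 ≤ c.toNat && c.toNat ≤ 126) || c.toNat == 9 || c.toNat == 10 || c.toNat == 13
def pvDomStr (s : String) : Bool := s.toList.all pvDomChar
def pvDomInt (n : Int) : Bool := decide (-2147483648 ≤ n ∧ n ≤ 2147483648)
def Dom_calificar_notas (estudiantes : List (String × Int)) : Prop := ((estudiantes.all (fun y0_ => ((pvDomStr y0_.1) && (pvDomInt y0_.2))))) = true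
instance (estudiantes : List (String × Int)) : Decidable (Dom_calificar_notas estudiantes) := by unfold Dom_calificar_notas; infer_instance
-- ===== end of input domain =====

-- B replaces the branch chain with two accumulators by an arithmetical band index looked up in a category table; both lists are derived from the zipped level list.

-- ===== PORT A =====
def calificar_notas (estudiantes : List (String × Int)) : (List (String × String)) × List String :=
  estudiantes.foldl
    (fun (st : List (String × String) × List String) p =>
      let (nombre, nota) := p
      if nota < 6 then (st.1 ++ [(nombre, "Regular")], st.2)
      else if nota < 8 then (st.1 ++ [(nombre, "Bueno")], st.2)
      else (st.1 ++ [(nombre, "Muy bueno")], st.2 ++ [nombre]))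
    ([], [])

-- ===== PORT B =====
def CATEGORIAS : List String := ["Regular", "Bueno", "Muy bueno"]

-- (nota >= 6) + (nota >= 8), Python booleans added as ints
def nivel (nota : Int) : Int :=
  (if 6 ≤ nota then 1 else 0) + (if 8 ≤ nota then 1 else 0)

def calificar_notas_alt (estudiantes : List (String × Int)) : (List (String × String)) × List String :=
  let niveles := estudiantes.map (fun p => nivel p.2)
  let calificaciones := (estudiantes.zip niveles).map
    (fun q => (q.1.1, CATEGORIAS.getD q.2.toNat ""))
  let alumnos_muy_buenos := ((estudiantes.zip niveles).filter (fun q => q.2 == 2)).map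
    (fun q => q.1.1)
  (calificaciones, alumnos_muy_buenos)

-- ===== PRECONDITION & SPEC =====
def Spec_calificar_notas (estudiantes : List (String × Int)) (out : (List (String × String)) × List String) : Prop := out = calificar_notas_alt estudiantes
instance (estudiantes : List (String × Int)) (out : (List (String × String)) × List String) : Decidable (Spec_calificar_notas estudiantes out) := by unfold Spec_calificar_notas; infer_instance

-- ===== CLAIM =====
def Claim_equal_calificar_notas : Prop := ∀ (estudiantes : List (String × Int)), Dom_calificar_notas estudiantes → Spec_calificar_notas estudiantes (calificar_notas estudiantes)

-- ===== LEMMAS AND PROOFS =====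
lemma foldl_acc (estudiantes : List (String × Int)) (c : List (String × String)) (m : List String) :
    estudiantes.foldl
      (fun (st : List (String × String) × List String) p =>
        let (nombre, nota) := p
        if nota < 6 then (st.1 ++ [(nombre, "Regular")], st.2)
        else if nota < 8 then (st.1 ++ [(nombre, "Bueno")], st.2)
        else (st.1 ++ [(nombre, "Muy bueno")], st.2 ++ [nombre]))
      (c, m)
    = (c ++ (calificar_notas_alt estudiantes).1, m ++ (calificar_notas_alt estudiantes).2) := by
  induction estudiantes generalizing c m with
  | nil => simp [calificar_notas_alt]
  | cons hd tl ih =>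
    obtain ⟨nombre, nota⟩ := hd
    simp only [List.foldl_cons]
    by_cases h1 : nota < 6
    · have hn : nivel nota = 0 := by unfold nivel; split_ifs <;> omega
      simp [h1, ih, calificar_notas_alt, hn, CATEGORIAS]
    · by_cases h2 : nota < 8
      · have hn : nivel nota = 1 := by unfold nivel; split_ifs <;> omega
        simp [h1, h2, ih, calificar_notas_alt, hn, CATEGORIAS]
      · have hn : nivel nota = 2 := by unfold nivel; split_ifs <;> omega
        simp [h1, h2, ih, calificar_notas_alt, hn, CATEGORIAS]

-- ===== VERDICT =====
theorem calificar_notas_spec : Claim_equal_calificar_notas := by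
  intro estudiantes _
  unfold Spec_calificar_notas calificar_notas
  rw [foldl_acc]
  simp
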